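-- pv_equiv track=rewrite | github.com/issdandavis/scbe-aethermoore-demo | src/ai_orchestration/security.py | _check_prompt_leakage
-- ===== SOURCE A (Python) =====
-- from typing import Dict, List, Optional, Any, Tuple, Set
--
-- def _check_prompt_leakage(output: str, context: Optional[Dict[str, Any]]) -> bool:
--     """Check if output contains system prompt content."""
--     if not context or 'system_prompt' not in context:
--         return False
--
--     system_prompt = context['system_prompt']
--     # Check if significant portions of system prompt appear in output
--     words = system_prompt.split()
--     if len(words) < 10:
--         return False
--
--     # Check for 5-gram matches
--     for i in range(len(words) - 4):
--         phrase = ' '.join(words[i:i+5])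
--         if phrase.lower() in output.lower():
--             return True
--
--     return False
-- ===== SOURCE B (Python) =====
-- def _check_prompt_leakage(output, context):
--     """Check if output contains system prompt content."""
--     sp = context.get('system_prompt') if context else None
--     words = sp.split() if sp is not None else []
--     if len(words) < 10:
--         return False
--     # Sliding 4-word window builds a hash set of all lowered 5-gram phrases in
--     # one pass; then a single window scan over the once-lowered output probes
--     # the set (one probe per position and distinct phrase length), instead of a
--     # separate substring search over a re-lowered output for every phrase.
--     grams = set()
--     w0, w1, w2, w3 = words[0], words[1], words[2], words[3]
--     for w4 in words[4:]:
--         grams.add(' '.join([w0, w1, w2, w3, w4]).lower())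
--         w0, w1, w2, w3 = w1, w2, w3, w4
--     sizes = {len(g) for g in grams}
--     low = output.lower()
--     for start in range(len(low)):
--         for size in sizes:
--             if low[start:start + size] in grams:
--                 return True
--     return False
-- ===== Notes on version B (the rewrite author's own statement) =====
-- stated objective: alternative
-- what changed: A runs a separate substring search over a freshly re-lowered output for each 5-gram taken by index slicing; B builds the set of lowered 5-grams in one sliding-window pass over the words (no index slicing), then lowers the output once and slides a window over it, probing the hash set at each position for each distinct phrase length.
import Mathlib
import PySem

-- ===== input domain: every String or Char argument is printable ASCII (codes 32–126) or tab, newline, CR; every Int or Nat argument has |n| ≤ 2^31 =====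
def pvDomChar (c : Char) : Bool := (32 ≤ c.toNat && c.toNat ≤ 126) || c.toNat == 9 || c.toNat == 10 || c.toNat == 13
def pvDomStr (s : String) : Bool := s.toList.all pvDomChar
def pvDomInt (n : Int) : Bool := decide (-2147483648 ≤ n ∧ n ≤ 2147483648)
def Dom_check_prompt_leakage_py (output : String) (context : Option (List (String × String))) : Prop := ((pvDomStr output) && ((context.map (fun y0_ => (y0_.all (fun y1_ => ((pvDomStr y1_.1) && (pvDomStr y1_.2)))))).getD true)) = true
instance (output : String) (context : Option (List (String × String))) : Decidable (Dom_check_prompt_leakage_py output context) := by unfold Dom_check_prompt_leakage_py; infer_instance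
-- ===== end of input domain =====

-- B replaces A's per-phrase substring search (each 5-gram taken by index slicing, the whole
-- output re-lowered per phrase) with one sliding-window pass over the words that builds a hash
-- set of the lowered 5-grams, followed by a window scan of the once-lowered output probing that
-- set (objective: alternative algorithm; same return value).

-- ===== PORT A =====
def check_prompt_leakage_py (output : String) (context : Option (List (String × String))) : Bool :=
  match context with
  | none => false
  | some ctx =>
    -- 'if not context or 'system_prompt' not in context: return False'
    if ctx.isEmpty || !(PySem.Dict.mk ctx).contains "system_prompt" then false
    else
      match (PySem.Dict.mk ctx).get? "system_prompt" with
      | none => false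
      | some system_prompt =>
        let words := PySem.Str.split₀ system_prompt
        if words.length < 10 then false
        else
          -- 'for i in range(len(words) - 4): …' with early 'return True' = any over the range
          (PySem.List.pyRange 0 ((words.length : Int) - 4) 1).any (fun i =>
            let phrase := PySem.Str.join " " (PySem.List.slice words (some i) (some (i + 5)))
            PySem.Str.isIn (PySem.Str.lower phrase) (PySem.Str.lower output))

-- ===== PORT B =====
-- the loop body 'grams.add(' '.join([w0,w1,w2,w3,w4]).lower()); w0,w1,w2,w3 = w1,w2,w3,w4'
def pvStepB (st : (String × String × String × String) × PySem.Set String) (w4 : String) :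
    (String × String × String × String) × PySem.Set String :=
  match st with
  | ((w0, w1, w2, w3), g) =>
    ((w1, w2, w3, w4), PySem.Set.add g (PySem.Str.lower (PySem.Str.join " " [w0, w1, w2, w3, w4])))

def check_prompt_leakage_py_alt (output : String) (context : Option (List (String × String))) : Bool :=
  -- 'sp = context.get('system_prompt') if context else None'
  let sp : Option String :=
    match context with
    | none => none
    | some ctx => if ctx.isEmpty then none else (PySem.Dict.mk ctx).get? "system_prompt"
  -- 'words = sp.split() if sp is not None else []'
  let words : List String := match sp with | none => [] | some s => PySem.Str.split₀ s
  if words.length < 10 then false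
  else
    -- sliding 4-word window over words[4:] accumulating the set of lowered phrases
    let grams : PySem.Set String :=
      ((PySem.List.slice words (some 4) none).foldl pvStepB
        ((words[0]!, words[1]!, words[2]!, words[3]!), PySem.Set.empty)).2
    let sizes : PySem.Set Int := PySem.Set.ofList (grams.map (fun g => PySem.Str.len g))
    let low := PySem.Str.lower output
    -- 'for start in range(len(low)): for size in sizes: if low[start:start+size] in grams: return True'
    (PySem.List.pyRange 0 (PySem.Str.len low) 1).any (fun start =>
      sizes.any (fun size =>
        PySem.Set.contains grams (PySem.Str.slice low (some start) (some (start + size)))))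

-- ===== PRECONDITION & SPEC =====
def Spec_check_prompt_leakage_py (output : String) (context : Option (List (String × String))) (out : Bool) : Prop := out = check_prompt_leakage_py_alt output context
instance (output : String) (context : Option (List (String × String))) (out : Bool) : Decidable (Spec_check_prompt_leakage_py output context out) := by unfold Spec_check_prompt_leakage_py; infer_instance

-- ===== CLAIM (what is proved, stated in full; the proofs are below) =====
def Claim_equal_check_prompt_leakage_py : Prop := ∀ (output : String) (context : Option (List (String × String))), Dom_check_prompt_leakage_py output context → Spec_check_prompt_leakage_py output context (check_prompt_leakage_py output context)

-- ===== LEMMAS AND PROOFS =====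

-- the lowered 5-gram phrases of a word list, in order (structural form of B's sliding window)
def pvPhrases : List String → List String
  | a :: b :: c :: d :: e :: rest =>
      PySem.Str.lower (PySem.Str.join " " [a, b, c, d, e]) :: pvPhrases (b :: c :: d :: e :: rest)
  | _ => []

-- B's fold builds exactly the set of pvPhrases, added in order onto the accumulator
lemma pv_fold_eq_phrases (rest : List String) :
    ∀ (w0 w1 w2 w3 : String) (acc : PySem.Set String),
      (rest.foldl pvStepB ((w0, w1, w2, w3), acc)).2
        = (pvPhrases (w0 :: w1 :: w2 :: w3 :: rest)).foldl PySem.Set.add acc := by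
  induction rest with
  | nil => intro w0 w1 w2 w3 acc; simp [pvPhrases]
  | cons w4 rest' ih =>
    intro w0 w1 w2 w3 acc
    simp only [List.foldl_cons, pvStepB, pvPhrases]
    exact ih w1 w2 w3 w4 _

-- pvPhrases is A's indexed phrase list
lemma pv_phrases_eq_map (l : List String) :
    pvPhrases l = (PySem.List.pyRange 0 ((l.length : Int) - 4) 1).map (fun i =>
      PySem.Str.lower (PySem.Str.join " " (PySem.List.slice l (some i) (some (i + 5))))) := by
  induction l using pvPhrases.induct with
  | case1 a b c d e rest ih =>
    have hlen : ((a :: b :: c :: d :: e :: rest).length : Int) - 4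
        = ((rest.length + 1 : Nat) : Int) := by simp; ring
    rw [hlen, PySem.List.pyRange_one]
    simp only [Int.sub_zero, Int.toNat_natCast, List.range_succ_eq_map, List.map_cons,
      List.map_map]
    rw [pvPhrases]
    congr 1  -- the head phrases agree definitionally; the tail remains
    have hlen2 : (((b :: c :: d :: e :: rest).length : Nat) : Int) - 4 = ((rest.length : Nat) : Int) := by
      simp; ring
    rw [ih, hlen2, PySem.List.pyRange_one]
    simp only [Int.sub_zero, Int.toNat_natCast, List.map_map]
    apply List.map_congr_left
    intro k _
    simp only [Function.comp, Nat.succ_eq_add_one, zero_add]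
    congr 2
    have h1 : ((k + 1 : Nat) : Int) + 5 = (((k + 6 : Nat)) : Int) := by push_cast; ring
    have h3 : ((k : Nat) : Int) + 5 = (((k + 5 : Nat)) : Int) := by push_cast; ring
    rw [h1, h3, PySem.List.slice_natCast, PySem.List.slice_natCast]
    simp only [List.drop_succ_cons]
    congr 1
    omega
  | case2 l hne =>
    have h4 : l.length ≤ 4 := by
      match l, hne with
      | [], _ => simp
      | [_], _ => simp
      | [_, _], _ => simp
      | [_, _, _], _ => simp
      | [_, _, _, _], _ => simp
      | a :: b :: c :: d :: e :: r, h => exact absurd rfl (h a b c d e r)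
    rw [PySem.List.pyRange_one_eq_nil (by omega)]
    unfold pvPhrases
    match l, hne, h4 with
    | [], _, _ => rfl
    | [_], _, _ => rfl
    | [_, _], _, _ => rfl
    | [_, _, _], _, _ => rfl
    | [_, _, _, _], _, _ => rfl

lemma pv_join_lower_ne_nil (l : List String) (h : 2 ≤ l.length) :
    (PySem.Str.lower (PySem.Str.join " " l)).toList ≠ [] := by
  match l, h with
  | a :: b :: rest, _ =>
    rw [PySem.Str.toList_lower, PySem.Str.toList_join]
    simp [PySem.Chars.lower, PySem.Chars.join_cons_cons]

lemma pv_slice_eq_of_prefix (ol p : String) (j : Nat) (h : p.toList <+: ol.toList.drop j) :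
    PySem.Str.slice ol (some (j : Int)) (some ((j : Int) + PySem.Str.len p)) = p := by
  apply String.toList_inj.mp
  rw [PySem.Str.toList_slice, PySem.Chars.slice_eq_listSlice, PySem.Str.len_eq]
  have h2 : (j : Int) + (p.toList.length : Int) = ((j + p.toList.length : Nat) : Int) := by push_cast; ring
  rw [h2, PySem.List.slice_natCast, Nat.add_sub_cancel_left]
  exact (List.prefix_iff_eq_take.mp h).symm

lemma pv_prefix_of_slice (ol p : String) (j L : Nat)
    (h : PySem.Str.slice ol (some (j : Int)) (some ((j : Int) + (L : Int))) = p) :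
    p.toList <+: ol.toList.drop j := by
  have h' := congrArg String.toList h
  rw [PySem.Str.toList_slice, PySem.Chars.slice_eq_listSlice] at h'
  have h2 : (j : Int) + (L : Int) = ((j + L : Nat) : Int) := by push_cast; ring
  rw [h2, PySem.List.slice_natCast, Nat.add_sub_cancel_left] at h'
  rw [← h']
  exact List.take_prefix _ _

lemma pv_phrase_ne_nil (words : List String) (i : Int) (_hW : 10 ≤ words.length)
    (h0 : 0 ≤ i) (h4 : i < (words.length : Int) - 4) :
    (PySem.Str.lower (PySem.Str.join " " (PySem.List.slice words (some i) (some (i + 5))))).toList ≠ [] := by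
  apply pv_join_lower_ne_nil
  obtain ⟨k, rfl⟩ := Int.eq_ofNat_of_zero_le h0
  have h5 : (k : Int) + 5 = ((k + 5 : Nat) : Int) := by push_cast; ring
  rw [h5, PySem.List.slice_natCast, Nat.add_sub_cancel_left]
  rw [List.length_take, List.length_drop]
  omega

-- core: A's per-phrase substring search equals B's windowed probe of the phrase set
lemma pv_core_eq (output : String) (words : List String) (hW : 10 ≤ words.length) :
    ((PySem.List.pyRange 0 ((words.length : Int) - 4) 1).any (fun i =>
        PySem.Str.isIn
          (PySem.Str.lower (PySem.Str.join " " (PySem.List.slice words (some i) (some (i + 5)))))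
          (PySem.Str.lower output)))
    = ((PySem.List.pyRange 0 (PySem.Str.len (PySem.Str.lower output)) 1).any (fun j =>
        (PySem.Set.ofList
            ((PySem.Set.ofList ((PySem.List.pyRange 0 ((words.length : Int) - 4) 1).map (fun i =>
                PySem.Str.lower (PySem.Str.join " " (PySem.List.slice words (some i) (some (i + 5))))))).map
              (fun p => PySem.Str.len p))).any (fun L =>
          PySem.Set.contains
            (PySem.Set.ofList ((PySem.List.pyRange 0 ((words.length : Int) - 4) 1).map (fun i =>
                PySem.Str.lower (PySem.Str.join " " (PySem.List.slice words (some i) (some (i + 5)))))))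
            (PySem.Str.slice (PySem.Str.lower output) (some j) (some (j + L)))))) := by
  apply Bool.coe_iff_coe.mp
  set P : Int → String := fun i =>
    PySem.Str.lower (PySem.Str.join " " (PySem.List.slice words (some i) (some (i + 5)))) with hP
  set R := PySem.List.pyRange 0 ((words.length : Int) - 4) 1 with hR
  set ol := PySem.Str.lower output with hol
  constructor
  · rintro hA
    rw [List.any_eq_true] at hA
    obtain ⟨i, hiR, hin⟩ := hA
    rw [hR, PySem.List.mem_pyRange_one] at hiR
    have hne : (P i).toList ≠ [] := pv_phrase_ne_nil words i hW hiR.1 hiR.2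
    rw [PySem.Str.isIn_eq] at hin
    obtain ⟨j, hpre⟩ := (PySem.Chars.exists_prefix_drop_iff_isIn _ _).mpr hin
    have hj : j < ol.toList.length := by
      by_contra hge
      rw [List.drop_eq_nil_of_le (by omega)] at hpre
      exact hne (List.prefix_nil.mp hpre)
    have hmemP : P i ∈ PySem.Set.ofList (R.map P) := by
      rw [PySem.Set.mem_ofList]
      exact List.mem_map.mpr ⟨i, by rw [hR, PySem.List.mem_pyRange_one]; exact hiR, rfl⟩
    rw [List.any_eq_true]
    refine ⟨(j : Int), ?_, ?_⟩
    · rw [PySem.List.mem_pyRange_one, PySem.Str.len_eq]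
      constructor
      · exact_mod_cast Nat.zero_le j
      · exact_mod_cast hj
    · rw [List.any_eq_true]
      refine ⟨PySem.Str.len (P i), ?_, ?_⟩
      · rw [PySem.Set.mem_ofList]
        exact List.mem_map.mpr ⟨P i, hmemP, rfl⟩
      · rw [pv_slice_eq_of_prefix ol (P i) j hpre]
        exact (PySem.Set.contains_iff _ _).mpr hmemP
  · rintro hB
    rw [List.any_eq_true] at hB
    obtain ⟨jI, hjR, hB2⟩ := hB
    rw [PySem.List.mem_pyRange_one] at hjR
    rw [List.any_eq_true] at hB2
    obtain ⟨L, hL, hcont⟩ := hB2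
    have hLnn : 0 ≤ L := by
      rw [PySem.Set.mem_ofList] at hL
      obtain ⟨q, _, rfl⟩ := List.mem_map.mp hL
      rw [PySem.Str.len_eq]
      exact_mod_cast Nat.zero_le _
    have hmem := (PySem.Set.contains_iff _ _).mp hcont
    rw [PySem.Set.mem_ofList] at hmem
    obtain ⟨i, hiR, hPi⟩ := List.mem_map.mp hmem
    obtain ⟨j, rfl⟩ := Int.eq_ofNat_of_zero_le hjR.1
    obtain ⟨Ln, rfl⟩ := Int.eq_ofNat_of_zero_le hLnn
    have hpre : (P i).toList <+: ol.toList.drop j :=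
      pv_prefix_of_slice ol (P i) j Ln hPi.symm
    rw [List.any_eq_true]
    refine ⟨i, hiR, ?_⟩
    rw [PySem.Str.isIn_eq]
    exact (PySem.Chars.exists_prefix_drop_iff_isIn _ _).mp ⟨j, hpre⟩

-- B's grams set IS Set.ofList of A's indexed phrase list (when there are ≥ 10 words)
lemma pv_grams_eq (words : List String) (hW : 10 ≤ words.length) :
    ((PySem.List.slice words (some 4) none).foldl pvStepB
        ((words[0]!, words[1]!, words[2]!, words[3]!), PySem.Set.empty)).2
      = PySem.Set.ofList ((PySem.List.pyRange 0 ((words.length : Int) - 4) 1).map (fun i =>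
          PySem.Str.lower (PySem.Str.join " " (PySem.List.slice words (some i) (some (i + 5)))))) := by
  match words, hW with
  | w0 :: w1 :: w2 :: w3 :: rest, _ =>
    have hs : PySem.List.slice (w0 :: w1 :: w2 :: w3 :: rest) (some 4) none = rest := by
      have h4 : (4 : Int) = ((4 : Nat) : Int) := by norm_num
      rw [h4, PySem.List.slice_from_natCast]
      rfl
    rw [hs]
    simp only [List.getElem!_cons_zero, List.getElem!_cons_succ]
    rw [pv_fold_eq_phrases, pv_phrases_eq_map, PySem.Set.ofList_eq_foldl]
    rfl

-- ===== VERDICT (by name: the statement is the Claim_ definition above) =====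
theorem check_prompt_leakage_py_spec : Claim_equal_check_prompt_leakage_py := by
  intro output context _
  unfold Spec_check_prompt_leakage_py check_prompt_leakage_py check_prompt_leakage_py_alt
  cases context with
  | none => rfl
  | some ctx =>
    by_cases hemp : ctx.isEmpty
    · simp only [hemp, Bool.true_or, if_true]
      rfl
    · simp only [hemp, Bool.false_or]
      by_cases hc : (PySem.Dict.mk ctx).contains "system_prompt"
      · simp only [hc, Bool.not_true, Bool.false_eq_true, if_false]
        cases hsp : (PySem.Dict.mk ctx).get? "system_prompt" with
        | none => rfl
        | some system_prompt =>
          by_cases h10 : (PySem.Str.split₀ system_prompt).length < 10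
          · simp only [h10, if_true]
          · simp only [h10, if_false]
            rw [pv_grams_eq _ (by omega)]
            exact pv_core_eq output (PySem.Str.split₀ system_prompt) (by omega)
      · -- key absent: A returns false; B's get? is none, so words = [] and B returns false
        simp only [hc, Bool.not_false, if_true]
        have hcf : (PySem.Dict.mk ctx).contains "system_prompt" = false := by
          cases h : (PySem.Dict.mk ctx).contains "system_prompt" with
          | false => rfl
          | true => exact absurd h hc
        have : (PySem.Dict.mk ctx).get? "system_prompt" = none := by
          rw [PySem.Dict.get?_eq_none_iff_contains]
          exact hcf
        rw [this]
        rfl
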